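-- pv_equiv track=rewrite | github.com/Cardinal-Cryptography/Aleph-Testnet | utils.py | n_parties_per_regions
-- ===== SOURCE A (Python) =====
-- def use_regions():
--     return ['eu-central-1', 'eu-west-1', 'eu-west-2', 'us-east-1', 'us-east-2', 'us-west-1', 'us-west-2']
--
-- def n_parties_per_regions(n_parties, regions=use_regions()):
--     nhpr = {}
--     n_left = n_parties
--     for r in regions:
--         nhpr[r] = n_parties // len(regions)
--         n_left -= n_parties // len(regions)
--
--     for i in range(n_left):
--         nhpr[regions[i]] += 1
--
--     for r in regions:
--         if r in nhpr and not nhpr[r]: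
--             nhpr.pop(r)
--
--     return nhpr
-- ===== SOURCE B (Python) =====
-- def use_regions():
--     return ['eu-central-1', 'eu-west-1', 'eu-west-2', 'us-east-1', 'us-east-2', 'us-west-1', 'us-west-2']
--
-- def n_parties_per_regions(n_parties, regions=use_regions()):
--     # Sequential fair division: each region in turn takes the ceiling share of the
--     # parties still left, divided by the number of regions still left; zero shares
--     # are never recorded.  No base/remainder split and no clean-up pass needed.
--     out = {}
--     n_left, k_left = n_parties, len(regions)
--     for r in regions:
--         take = -(-n_left // k_left)
--         if take:
--             out[r] = take
--         n_left -= take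
--         k_left -= 1
--     return out
-- ===== Notes on version B (the rewrite author's own statement) =====
-- stated objective: alternative
-- what changed: Replaces A's quotient/remainder scheme (give every region the floor share, index back into the list to increment the first n_left regions, then delete zero entries in a third pass) by a sequential fair-division loop: each region in turn takes the ceiling of parties-still-left over regions-still-left, recording only nonzero shares, so no remainder is ever computed and no clean-up pass exists.
-- outside the precondition, e.g. on n_parties_per_regions(3, ['a', 'a']): A returns {'a': 2}, B returns {'a': 1}
import Mathlib
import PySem

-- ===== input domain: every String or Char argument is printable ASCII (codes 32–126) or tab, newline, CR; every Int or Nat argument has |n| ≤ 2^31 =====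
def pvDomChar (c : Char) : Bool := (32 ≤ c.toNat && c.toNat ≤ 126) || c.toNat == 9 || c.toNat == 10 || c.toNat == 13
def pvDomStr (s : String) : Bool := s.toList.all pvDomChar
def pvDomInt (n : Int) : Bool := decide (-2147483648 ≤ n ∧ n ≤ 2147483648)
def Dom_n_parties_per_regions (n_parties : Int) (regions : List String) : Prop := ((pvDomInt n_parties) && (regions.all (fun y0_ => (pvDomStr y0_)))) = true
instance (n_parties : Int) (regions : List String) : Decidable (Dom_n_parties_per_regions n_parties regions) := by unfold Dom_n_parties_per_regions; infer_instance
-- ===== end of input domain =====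

-- B replaces A's quotient/remainder scheme (floor share to all, +1 to the first n_left by index,
-- then delete zeros) by a sequential fair-division loop: each region takes the ceiling of the
-- parties still left over the regions still left (objective: alternative).

-- ===== PORT A =====
def n_parties_per_regions (n_parties : Int) (regions : List String) : List (String × Int) :=
  -- q = n_parties // len(regions); the first loop builds nhpr and n_left together
  let q : Int := PySem.Int.floordiv n_parties (regions.length : Int)
  let st := regions.foldl
    (fun (p : PySem.Dict String Int × Int) r => (p.1.insert r q, p.2 - q))
    (PySem.Dict.empty, n_parties)
  -- for i in range(n_left): nhpr[regions[i]] += 1  (inside Pre_ the index and key are always valid)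
  let d2 := (PySem.List.pyRange 0 st.2 1).foldl
    (fun d i =>
      match PySem.List.pyGet? regions i with
      | some r => d.insert r (d.getD r 0 + 1)
      | none => d) st.1
  -- for r in regions: if r in nhpr and not nhpr[r]: nhpr.pop(r)
  let d3 := regions.foldl
    (fun d r => if d.contains r && (d.getD r 0 == 0) then d.erase r else d) d2
  d3.items

-- ===== PORT B =====
def n_parties_per_regions_alt (n_parties : Int) (regions : List String) : List (String × Int) :=
  -- out = {}; n_left, k_left = n_parties, len(regions)
  -- for r in regions: take = -(-n_left // k_left); if take: out[r] = take; n_left -= take; k_left -= 1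
  let st := regions.foldl
    (fun (st : PySem.Dict String Int × Int × Int) r =>
      let take := -(PySem.Int.floordiv (-(st.2.1)) st.2.2)
      ((if take == 0 then st.1 else st.1.insert r take), st.2.1 - take, st.2.2 - 1))
    (PySem.Dict.empty, n_parties, (regions.length : Int))
  st.1.items

-- ===== PRECONDITION & SPEC =====
-- Pre_ excludes lists with duplicate region names, on which A's overwrite-then-increment dict
-- arithmetic is an accidental corner (the counts no longer partition n_parties), and the empty
-- region list with positive n_parties, where A raises IndexError.
def Pre_n_parties_per_regions (n_parties : Int) (regions : List String) : Prop :=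
  regions.Nodup ∧ (regions ≠ [] ∨ n_parties ≤ 0)
instance (n_parties : Int) (regions : List String) : Decidable (Pre_n_parties_per_regions n_parties regions) := by unfold Pre_n_parties_per_regions; infer_instance
def pvWitness_n_parties_per_regions : Int × List String := (5, ["a", "b", "c"])
def Spec_n_parties_per_regions (n_parties : Int) (regions : List String) (out : List (String × Int)) : Prop := out = n_parties_per_regions_alt n_parties regions
instance (n_parties : Int) (regions : List String) (out : List (String × Int)) : Decidable (Spec_n_parties_per_regions n_parties regions out) := by unfold Spec_n_parties_per_regions; infer_instance

-- ===== CLAIM (what is proved, stated in full; the proofs are below) =====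
def Claim_equal_n_parties_per_regions : Prop := ∀ (n_parties : Int) (regions : List String), Dom_n_parties_per_regions n_parties regions → Pre_n_parties_per_regions n_parties regions → Spec_n_parties_per_regions n_parties regions (n_parties_per_regions n_parties regions)

-- ===== LEMMAS AND PROOFS =====

-- each region's final share in A's scheme, by its position i among k regions
def pvVal (n k : Int) (i : Nat) : Int :=
  PySem.Int.floordiv n k + (if (i : Int) < PySem.Int.mod n k then 1 else 0)

-- the nonzero (position, value) shares laid out in region order
def pvMkL : (Nat → Int) → List String → List (String × Int)
  | _, [] => []
  | g, r :: t => (if g 0 == 0 then [] else [(r, g 0)]) ++ pvMkL (fun j => g (j + 1)) t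

-- B's loop, rephrased as structural recursion on the region list
def pvShares : PySem.Dict String Int → Int → List String → PySem.Dict String Int
  | d, _, [] => d
  | d, n, r :: t =>
    let take := -(PySem.Int.floordiv (-n) ((t.length : Int) + 1))
    pvShares (if take == 0 then d else d.insert r take) (n - take) t

theorem pvMkL_congr (g g' : Nat → Int) (rs : List String) (h : ∀ j, g j = g' j) :
    pvMkL g rs = pvMkL g' rs := by
  induction rs generalizing g g' with
  | nil => rfl
  | cons r t ih => simp only [pvMkL, h 0, ih (fun j => g (j + 1)) (fun j => g' (j + 1)) (fun j => h (j + 1))]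

-- the first (ceiling) share is pvVal … 0
theorem pvVal_zero (n k : Int) :
    pvVal n k 0 = PySem.Int.floordiv n k + (if 0 < PySem.Int.mod n k then 1 else 0) := by
  unfold pvVal
  norm_num

theorem pvTake0 (n k : Int) (hk : 0 < k) :
    -(PySem.Int.floordiv (-n) k) = pvVal n k 0 := by
  have hid := PySem.Int.floordiv_mul_add_mod n k
  have h0 := PySem.Int.mod_nonneg n hk
  have hlt := PySem.Int.mod_lt n hk
  rw [pvVal_zero, PySem.Int.neg_floordiv_neg_eq_iff_of_pos hk]
  split_ifs with h <;> constructor <;> nlinarith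

-- after the first region takes its ceiling share, positions shift by one
theorem pvValShift (n k : Int) (hk : 0 < k) (j : Nat) :
    pvVal (n - pvVal n (k + 1) 0) k j = pvVal n (k + 1) (j + 1) := by
  have hk1 : (0 : Int) < k + 1 := by omega
  have hid := PySem.Int.floordiv_mul_add_mod n (k + 1)
  have h0 := PySem.Int.mod_nonneg n hk1
  have hlt := PySem.Int.mod_lt n hk1
  rw [pvVal_zero]
  have hdiv : PySem.Int.floordiv
      (n - (PySem.Int.floordiv n (k + 1) + (if 0 < PySem.Int.mod n (k + 1) then 1 else 0))) k
      = PySem.Int.floordiv n (k + 1) := by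
    rw [PySem.Int.floordiv_eq_iff_of_pos hk]
    split_ifs with h <;> constructor <;> nlinarith
  have hmod : PySem.Int.mod
      (n - (PySem.Int.floordiv n (k + 1) + (if 0 < PySem.Int.mod n (k + 1) then 1 else 0))) k
      = PySem.Int.mod n (k + 1) - (if 0 < PySem.Int.mod n (k + 1) then 1 else 0) := by
    have hid2 := PySem.Int.floordiv_mul_add_mod
      (n - (PySem.Int.floordiv n (k + 1) + (if 0 < PySem.Int.mod n (k + 1) then 1 else 0))) k
    rw [hdiv] at hid2
    split_ifs at hid2 ⊢ <;> nlinarith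
  unfold pvVal
  rw [hdiv, hmod]
  have hcast : ((j + 1 : Nat) : Int) = (j : Int) + 1 := by push_cast; ring
  rw [hcast]
  generalize PySem.Int.mod n (k + 1) = M at h0 hlt ⊢
  split_ifs <;> omega

-- B's foldl (with its count-down counter) is pvShares
theorem pvFoldB (rs : List String) : ∀ (d : PySem.Dict String Int) (n k : Int),
    k = (rs.length : Int) →
    (rs.foldl
      (fun (st : PySem.Dict String Int × Int × Int) r =>
        let take := -(PySem.Int.floordiv (-(st.2.1)) st.2.2)
        ((if take == 0 then st.1 else st.1.insert r take), st.2.1 - take, st.2.2 - 1))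
      (d, n, k)).1 = pvShares d n rs := by
  induction rs with
  | nil => intro d n k hk; rfl
  | cons r t ih =>
      intro d n k hk
      have hk1 : k = (t.length : Int) + 1 := by rw [hk, List.length_cons]; push_cast; ring
      subst hk1
      simp only [List.foldl_cons, pvShares]
      have h1 : ((t.length : Int) + 1) - 1 = (t.length : Int) := by ring
      simp only [h1]
      exact ih _ _ _ rfl

-- items of pvShares: the accumulated dict, then the shares of the remaining regions in order
theorem pvSharesItems (rs : List String) (n : Int) (d : PySem.Dict String Int)
    (hnd : rs.Nodup) (hdk : d.keys.Nodup) (hfr : ∀ r ∈ rs, d.contains r = false) :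
    (pvShares d n rs).items = d.items ++ pvMkL (fun i => pvVal n (rs.length : Int) i) rs := by
  induction rs generalizing n d with
  | nil => simp [pvShares, pvMkL]
  | cons r t ih =>
      have hkpos : (0 : Int) < (t.length : Int) + 1 := by positivity
      have htake : -(PySem.Int.floordiv (-n) ((t.length : Int) + 1))
          = pvVal n ((t.length : Int) + 1) 0 := pvTake0 n _ hkpos
      have hlen : (((r :: t).length : Nat) : Int) = (t.length : Int) + 1 := by rw [List.length_cons]; push_cast; ring
      have hshift : pvMkL (fun j => pvVal (n - pvVal n ((t.length : Int) + 1) 0) (t.length : Int) j) t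
          = pvMkL (fun j => pvVal n ((t.length : Int) + 1) (j + 1)) t := by
        cases t with
        | nil => rfl
        | cons x u =>
            apply pvMkL_congr
            intro j
            exact pvValShift n _ (by simp) j
      simp only [pvShares, pvMkL, hlen, htake]
      by_cases hz : pvVal n ((t.length : Int) + 1) 0 = 0
      · have hz' : (pvVal n ((t.length : Int) + 1) 0 == 0) = true := by simp [hz]
        rw [if_pos hz', if_pos hz']
        rw [ih _ _ hnd.of_cons hdk (fun x hx => hfr x (List.mem_cons_of_mem r hx))]
        rw [hshift]
        simp
      · have hz' : (pvVal n ((t.length : Int) + 1) 0 == 0) = false := by simp [hz]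
        rw [if_neg (by simp [hz']), if_neg (by simp [hz'])]
        have hfresh : d.contains r = false := hfr r (List.mem_cons_self)
        have hdk' : (d.insert r (pvVal n ((t.length : Int) + 1) 0)).keys.Nodup := by
          rw [PySem.Dict.keys_insert_of_not_contains _ _ hfresh]
          exact List.Nodup.append hdk (List.nodup_singleton r)
            (by simp [List.disjoint_singleton]
                intro hmem
                have hc : d.contains r = true := by rw [PySem.Dict.contains_iff_mem_keys]; exact hmem
                rw [hfresh] at hc
                exact Bool.false_ne_true hc)
        have hfr' : ∀ x ∈ t, (d.insert r (pvVal n ((t.length : Int) + 1) 0)).contains x = false := by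
          intro x hx
          rw [PySem.Dict.contains_insert]
          have hxr : x ≠ r := fun he => (List.nodup_cons.1 hnd).1 (he ▸ hx)
          simp [hxr, hfr x (List.mem_cons_of_mem r hx)]
        rw [ih _ _ hnd.of_cons hdk' hfr']
        rw [hshift, PySem.Dict.items_insert_of_not_contains _ _ hfresh]
        simp

-- A's delete-zeros pass over the mapped items is pvMkL of the positional values
theorem pvMapFilter (rs : List String) (all : List String) (g : Nat → Int) (f : String → Int)
    (hsub : ∀ r ∈ rs, r ∈ all)
    (h : ∀ (i : Nat) (hi : i < rs.length), f rs[i] = g i) :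
    (rs.map (fun r => (r, f r))).filter (fun p => !(all.contains p.1 && p.2 == 0))
      = pvMkL g rs := by
  induction rs generalizing g with
  | nil => rfl
  | cons r t ih =>
      have h0 : f r = g 0 := h 0 (by simp)
      have hc : all.contains r = true := by
        simpa using hsub r List.mem_cons_self
      simp only [List.map_cons, List.filter_cons, pvMkL, h0, hc]
      rw [ih (fun j => g (j + 1)) (fun x hx => hsub x (List.mem_cons_of_mem r hx))
          (fun i hi => h (i + 1) (by simpa using Nat.succ_lt_succ hi))]
      by_cases hz : g 0 = 0
      · simp [hz]
      · simp [hz]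

-- in a duplicate-free list, the count of rs[i] among the first m elements is 1 iff i < m
theorem pvCountTake (rs : List String) (hnd : rs.Nodup) (m i : Nat) (hi : i < rs.length) :
    (rs.take m).count rs[i] = if i < m then 1 else 0 := by
  by_cases him : i < m
  · rw [if_pos him]
    have hmem : rs[i] ∈ rs.take m := by
      have : (rs.take m)[i]'(by simp; omega) = rs[i] := List.getElem_take
      exact this ▸ List.getElem_mem _
    exact List.count_eq_one_of_mem ((List.take_sublist m rs).nodup hnd) hmem
  · rw [if_neg him]
    rw [List.count_eq_zero]
    intro hmem
    obtain ⟨j, hj, hje⟩ := List.getElem_of_mem hmem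
    have hj' : j < rs.length := by
      have := List.length_take_le m rs
      omega
    have : rs[j]'hj' = rs[i] := by
      rw [← hje]
      exact (List.getElem_take).symm
    have hji : j = i := (List.Nodup.getElem_inj_iff hnd).1 this
    have hjm : j < m := by
      have h2 : (rs.take m).length = min m rs.length := List.length_take
      omega
    omega

theorem pvRange_refl (a : Int) : PySem.List.pyRange a a 1 = [] := by
  simp [PySem.List.pyRange]

theorem pvRange_succ (m : Nat) :
    PySem.List.pyRange 0 ((m : Int) + 1) 1 = PySem.List.pyRange 0 (m : Int) 1 ++ [(m : Int)] := by
  rw [PySem.List.pyRange_one_append 0 (m : Int) ((m : Int) + 1) (by positivity) (by omega)]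
  rw [PySem.List.pyRange_one_cons (show (m : Int) < (m : Int) + 1 by omega), pvRange_refl]

-- first loop of A: the pair state splits into the dict fold and a running subtraction
theorem pvL1 (l : List String) (q : Int) (d : PySem.Dict String Int) (c : Int) :
    l.foldl (fun (p : PySem.Dict String Int × Int) r => (p.1.insert r q, p.2 - q)) (d, c)
      = (l.foldl (fun d r => d.insert r q) d, c - l.length * q) := by
  induction l generalizing d c with
  | nil => simp
  | cons r t ih =>
      simp only [List.foldl_cons, ih, List.length_cons]
      have : c - q - (t.length : Int) * q = c - ((t.length : Nat) + 1 : Nat) * q := by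
        push_cast; ring
      rw [this]

-- repeated constant insertion: every inserted key holds q
theorem pvGetDConst (l : List String) (q : Int) (k : String) (hk : k ∈ l) :
    (l.foldl (fun (d : PySem.Dict String Int) r => d.insert r q) PySem.Dict.empty).getD k 0 = q := by
  induction l using List.reverseRecOn with
  | nil => cases hk
  | append_singleton t r ih =>
      rw [List.foldl_append, List.foldl_cons, List.foldl_nil, PySem.Dict.getD_insert]
      by_cases hkr : k = r
      · simp [hkr]
      · have hkt : k ∈ t := by
          rcases List.mem_append.1 hk with h | h
          · exact h
          · exact absurd (List.mem_singleton.1 h) hkr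
        simp [hkr, ih hkt]

-- the index loop 'for i in range(m): …regions[i]…' is a fold over the first m regions
theorem pvTakeFold (regions : List String) (m : Nat) (hm : m ≤ regions.length)
    (d : PySem.Dict String Int) :
    (PySem.List.pyRange 0 (m : Int) 1).foldl
      (fun d i =>
        match PySem.List.pyGet? regions i with
        | some r => d.insert r (d.getD r 0 + 1)
        | none => d) d
      = (regions.take m).foldl (fun d r => d.insert r (d.getD r 0 + 1)) d := by
  induction m with
  | zero => simp
  | succ m ih =>
      have hm' : m ≤ regions.length := by omega
      have hmlt : m < regions.length := by omega
      have hsplit : PySem.List.pyRange 0 ((m + 1 : Nat) : Int) 1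
          = PySem.List.pyRange 0 (m : Int) 1 ++ [(m : Int)] := by
        push_cast
        exact pvRange_succ m
      have hGet : PySem.List.pyGet? regions (m : Int) = some regions[m] := by
        rw [PySem.List.pyGet?_natCast]
        simp [List.getElem?_eq_getElem hmlt]
      have htake : regions.take (m + 1) = regions.take m ++ [regions[m]] := by
        rw [List.take_add_one, List.getElem?_eq_getElem hmlt]
        rfl
      rw [hsplit, htake, List.foldl_append, List.foldl_append, ih hm']
      simp [hGet]

-- third loop of A: popping the zero-valued keys filters the items
theorem pvL3 (l : List String) (d : PySem.Dict String Int) (hnd : d.keys.Nodup) :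
    (l.foldl (fun d r => if d.contains r && (d.getD r 0 == 0) then d.erase r else d) d).items
      = d.items.filter (fun p => !(l.contains p.1 && p.2 == 0)) := by
  induction l generalizing d with
  | nil => simp
  | cons r t ih =>
      simp only [List.foldl_cons]
      by_cases hg : (d.contains r && (d.getD r 0 == 0)) = true
      · rw [if_pos hg]
        have hzero : d.getD r 0 = 0 := by
          have h := hg
          simp only [Bool.and_eq_true] at h
          exact beq_iff_eq.1 h.2
        have hErase : (d.erase r).items = d.items.filter (fun p => !(p.1 == r)) := rfl
        have hnd' : (d.erase r).keys.Nodup := by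
          have hnd2 : (d.items.map (·.1)).Nodup := hnd
          have hsub : (d.items.filter (fun p => !(p.1 == r))).Sublist d.items :=
            List.filter_sublist
          exact ((hsub.map (fun p => p.1)).nodup hnd2)
        rw [ih (d.erase r) hnd', hErase, List.filter_filter]
        apply List.filter_congr
        intro p hp
        by_cases hpr : p.1 = r
        · have : p.2 = 0 := by
            have := PySem.Dict.getD_of_mem_items d (by exact hp) hnd 0
            rw [hpr] at this
            omega
          simp [hpr, this]
        · simp [hpr]
      · rw [if_neg hg]
        rw [ih d hnd]
        apply List.filter_congr
        intro p hp
        by_cases hpr : p.1 = r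
        · have hcont : d.contains p.1 = true := by
            rw [PySem.Dict.contains_iff_mem_keys]
            exact PySem.Dict.mem_keys_of_mem_items d hp
          have hnz : d.getD r 0 ≠ 0 := by
            intro h
            apply hg
            rw [← hpr] at *
            simp [hcont, h]
          have hpnz : p.2 ≠ 0 := by
            have := PySem.Dict.getD_of_mem_items d (by exact hp) hnd 0
            rw [hpr] at this
            omega
          simp [hpr, hpnz]
        · simp [hpr]

theorem pvK1 (regions : List String) (q : Int) :
    (regions.foldl (fun (d : PySem.Dict String Int) r => d.insert r q) PySem.Dict.empty).keys
      = PySem.Set.ofList regions := by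
  have h := PySem.Dict.keys_foldl_insert regions (fun _ _ => q)
    (PySem.Dict.empty (κ := String) (ν := Int))
  simpa [PySem.Dict.keys_empty, PySem.Set.update_nil_left] using h

theorem pvND1 (regions : List String) (q : Int) :
    (regions.foldl (fun (d : PySem.Dict String Int) r => d.insert r q) PySem.Dict.empty).keys.Nodup := by
  have h := PySem.Dict.nodup_keys_foldl_insert regions (fun _ _ => q)
    (PySem.Dict.empty (κ := String) (ν := Int)) (by simp [PySem.Dict.keys_empty])
  simpa using h

-- port A on the empty region list
theorem pvAEmpty (n : Int) : n_parties_per_regions n [] = [] := by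
  unfold n_parties_per_regions
  simp only [List.foldl_nil, List.length_nil]
  rw [List.foldl_fixed' (a := (PySem.Dict.empty : PySem.Dict String Int))]
  · rfl
  · intro i
    cases h : PySem.List.pyGet? ([] : List String) i with
    | none => rfl
    | some r => exact absurd (PySem.List.mem_of_pyGet?_eq_some _ h) (by simp)

-- ===== VERDICT (by name: the statement is the Claim_ definition above) =====
theorem n_parties_per_regions_spec : Claim_equal_n_parties_per_regions := by
  intro n regions _ hPre
  unfold Spec_n_parties_per_regions
  obtain ⟨hnodup, -⟩ := hPre
  by_cases hne : regions = []
  · subst hne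
    rw [pvAEmpty]
    rfl
  have hlenpos : 0 < regions.length := List.length_pos_of_ne_nil hne
  have hLpos : (0 : Int) < (regions.length : Int) := by exact_mod_cast hlenpos
  have hid := PySem.Int.floordiv_mul_add_mod n (regions.length : Int)
  have hrem0 := PySem.Int.mod_nonneg n hLpos
  have hremlt := PySem.Int.mod_lt n hLpos
  have hid2 : n - (regions.length : Int) * PySem.Int.floordiv n (regions.length : Int)
      = PySem.Int.mod n (regions.length : Int) := by nlinarith [hid]
  have htn : (((PySem.Int.mod n (regions.length : Int)).toNat : Nat) : Int)
      = PySem.Int.mod n (regions.length : Int) := Int.toNat_of_nonneg hrem0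
  have hm : (PySem.Int.mod n (regions.length : Int)).toNat ≤ regions.length := by omega
  -- ===== B side =====
  have hB : n_parties_per_regions_alt n regions
      = pvMkL (fun i => pvVal n (regions.length : Int) i) regions := by
    simp only [n_parties_per_regions_alt]
    rw [pvFoldB regions PySem.Dict.empty n _ rfl]
    rw [pvSharesItems regions n PySem.Dict.empty hnodup (by simp [PySem.Dict.keys_empty])
        (fun r _ => PySem.Dict.contains_empty r)]
    rfl
  rw [hB]
  -- ===== A side =====
  unfold n_parties_per_regions
  simp only [pvL1]
  rw [hid2, ← htn, pvTakeFold regions _ hm]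
  -- the dict after the first two loops
  have hK2 : ((regions.take (PySem.Int.mod n (regions.length : Int)).toNat).foldl
      (fun (d : PySem.Dict String Int) r => d.insert r (d.getD r 0 + 1))
      (regions.foldl (fun (d : PySem.Dict String Int) r =>
        d.insert r (PySem.Int.floordiv n (regions.length : Int))) PySem.Dict.empty)).keys
      = PySem.Set.ofList regions := by
    rw [PySem.Dict.keys_foldl_insert, pvK1, PySem.Set.update_eq_append_filter]
    have hfil : (PySem.Set.ofList (regions.take (PySem.Int.mod n (regions.length : Int)).toNat)).filter
        (fun y => !(PySem.Set.ofList regions).contains y) = [] := by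
      apply List.filter_eq_nil_iff.2
      intro y hy
      have hy2 : y ∈ regions :=
        List.mem_of_mem_take ((PySem.Set.mem_ofList _ y).1 hy)
      simp
      exact hy2
    rw [hfil, List.append_nil]
  have hND2 : ((regions.take (PySem.Int.mod n (regions.length : Int)).toNat).foldl
      (fun (d : PySem.Dict String Int) r => d.insert r (d.getD r 0 + 1))
      (regions.foldl (fun (d : PySem.Dict String Int) r =>
        d.insert r (PySem.Int.floordiv n (regions.length : Int))) PySem.Dict.empty)).keys.Nodup :=
    PySem.Dict.nodup_keys_foldl_insert _ _ _ (pvND1 regions _)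
  rw [pvL3 regions _ hND2]
  rw [PySem.Dict.items_eq_map_keys _ hND2 0]
  rw [hK2, PySem.Set.ofList_eq_self_of_nodup regions hnodup]
  -- each key's accumulated value is its positional share
  exact pvMapFilter regions regions (fun i => pvVal n (regions.length : Int) i) _
    (fun r hr => hr) (by
    intro i hi
    rw [PySem.Dict.getD_foldl_insert_add_one,
        pvGetDConst regions _ _ (List.getElem_mem hi),
        pvCountTake regions hnodup _ i hi]
    simp only [pvVal]
    by_cases him : i < (PySem.Int.mod n (regions.length : Int)).toNat
    · rw [if_pos him, if_pos (by rw [← htn]; exact_mod_cast him)]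
      norm_num
    · rw [if_neg him, if_neg (by
        rw [← htn]
        intro hc
        exact him (by exact_mod_cast hc))]
      norm_num)
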